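-- pv_equiv track=rewrite | github.com/ryanlayerlab/hypedsearch | src/lookups/utils.py | all_perms_of_s
-- ===== SOURCE A (Python) =====
-- from itertools import product
--
-- def all_perms_of_s(s: str, keyletters: str) -> list:
--     seq = list(s)
--     perms = []
--     indices = [ i for i, c in enumerate(seq) if c in keyletters ]
--     for t in product(keyletters, repeat=len(indices)):
--         for i, c in zip(indices, t):
--             seq[i] = c
--         perms.append(''.join(seq))
--     return perms
-- ===== SOURCE B (Python) =====
-- def all_perms_of_s(s: str, keyletters: str) -> list:
--     # Left-to-right breadth-first expansion: one pass over s, growing all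
--     # partial strings; no itertools, no index list, no template mutation.
--     perms = ['']
--     for c in s:
--         if c in keyletters:
--             perms = [p + k for p in perms for k in keyletters]
--         else:
--             perms = [p + c for p in perms]
--     return perms
-- ===== Notes on version B (the rewrite author's own statement) =====
-- stated objective: alternative
-- what changed: B drops itertools.product, the index list and the mutable template entirely: it makes a single left-to-right pass over s, maintaining the list of all partial result strings and extending each by the fixed character or by every keyletter at key positions.
import Mathlib
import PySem

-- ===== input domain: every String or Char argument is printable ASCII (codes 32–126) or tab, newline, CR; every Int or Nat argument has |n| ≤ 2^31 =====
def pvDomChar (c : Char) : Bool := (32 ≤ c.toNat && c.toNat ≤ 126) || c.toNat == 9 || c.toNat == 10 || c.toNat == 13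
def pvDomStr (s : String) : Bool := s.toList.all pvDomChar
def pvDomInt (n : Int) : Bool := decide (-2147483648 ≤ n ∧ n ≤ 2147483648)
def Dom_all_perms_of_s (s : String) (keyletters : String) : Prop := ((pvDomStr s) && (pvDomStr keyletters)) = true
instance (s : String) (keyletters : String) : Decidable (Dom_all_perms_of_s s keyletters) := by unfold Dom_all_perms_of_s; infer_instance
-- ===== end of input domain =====

-- B replaces A's product-over-key-positions with a single left-to-right pass that
-- grows the list of all partial strings (no itertools, no index list, no mutable
-- template); objective: alternative decomposition, same values in the same order.

-- ===== PORT A =====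
-- itertools.product(K, repeat=n) in Python's order (leftmost position varies slowest)
def pvProdRep (K : List Char) : Nat → List (List Char)
  | 0 => [[]]
  | n + 1 => K.flatMap (fun c => (pvProdRep K n).map (c :: ·))

def all_perms_of_s (s : String) (keyletters : String) : List String :=
  let seq := s.toList
  -- indices = [i for i, c in enumerate(seq) if c in keyletters]
  -- ('c in keyletters' with c a single character = list membership; exact here)
  let indices := (PySem.List.enumerate seq).filterMap
    (fun p => if p.2 ∈ keyletters.toList then some p.1 else none)
  -- for t in product(keyletters, repeat=len(indices)): seq[i] = c …; perms.append(''.join(seq))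
  ((pvProdRep keyletters.toList indices.length).foldl
    (fun st t =>
      let sq := (indices.zip t).foldl
        (fun sq2 ic => PySem.List.pySetD sq2 ic.1 ic.2) st.1
      (sq, st.2 ++ [String.mk sq]))
    (seq, ([] : List String))).2

-- ===== PORT B =====
def all_perms_of_s_alt (s : String) (keyletters : String) : List String :=
  -- perms = ['']; for c in s: extend every partial string by c, or by each keyletter
  s.toList.foldl
    (fun perms c =>
      if c ∈ keyletters.toList then
        perms.flatMap (fun p => keyletters.toList.map (fun k => p.push k))
      else
        perms.map (fun p => p.push c))
    [""]

-- ===== PRECONDITION & SPEC =====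
def Spec_all_perms_of_s (s : String) (keyletters : String) (out : List String) : Prop := out = all_perms_of_s_alt s keyletters
instance (s : String) (keyletters : String) (out : List String) : Decidable (Spec_all_perms_of_s s keyletters out) := by unfold Spec_all_perms_of_s; infer_instance

-- ===== CLAIM (what is proved, stated in full; the proofs are below) =====
def Claim_equal_all_perms_of_s : Prop := ∀ (s : String) (keyletters : String), Dom_all_perms_of_s s keyletters → Spec_all_perms_of_s s keyletters (all_perms_of_s s keyletters)

-- ===== LEMMAS AND PROOFS =====

-- Cartesian product of per-position choice lists, Python product's order
def pvCartProd : List (List Char) → List (List Char)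
  | [] => [[]]
  | xs :: rest => xs.flatMap (fun x => (pvCartProd rest).map (x :: ·))

-- fill cs t: substitute successive elements of t at the key positions of cs
def pvFill (K : List Char) : List Char → List Char → List Char
  | [], _ => []
  | c :: cs, t =>
    if c ∈ K then
      match t with
      | u :: t' => u :: pvFill K cs t'
      | [] => c :: pvFill K cs []
    else c :: pvFill K cs t

-- sq agrees with cs at every non-key position (and has the same length)
def pvOffEq (K : List Char) : List Char → List Char → Prop
  | [], sq => sq = []
  | c :: cs, sq =>
    match sq with
    | [] => False
    | x :: sq' => (c ∉ K → x = c) ∧ pvOffEq K cs sq'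

def pvCount (K : List Char) (cs : List Char) : Nat :=
  (cs.filter (fun c => c ∈ K)).length

-- the body of A's outer loop, named so the proofs can speak about it
def pvStep (K cs : List Char) (st : List Char × List String) (t : List Char) :
    List Char × List String :=
  let s2 := (((PySem.List.enumerate cs).filterMap
      (fun p => if p.2 ∈ K then some p.1 else none)).zip t).foldl
    (fun a ic => PySem.List.pySetD a ic.1 ic.2) st.1
  (s2, st.2 ++ [String.mk s2])

-- the body of B's loop, over List Char partial results
def pvStepB (K : List Char) (acc : List (List Char)) (c : Char) : List (List Char) :=
  if c ∈ K then acc.flatMap (fun p => K.map (fun k => p ++ [k]))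
  else acc.map (· ++ [c])

theorem pvFill_cons_key (K : List Char) (c : Char) (cs : List Char) (u : Char) (t : List Char)
    (h : c ∈ K) : pvFill K (c :: cs) (u :: t) = u :: pvFill K cs t := by
  simp [pvFill, h]

theorem pvFill_cons_nonkey (K : List Char) (c : Char) (cs : List Char) (t : List Char)
    (h : c ∉ K) : pvFill K (c :: cs) t = c :: pvFill K cs t := by
  simp [pvFill, h]

theorem pvIdx_len (K : List Char) : ∀ (cs : List Char) (st : Int),
    ((PySem.List.enumerate cs st).filterMap
      (fun p => if p.2 ∈ K then some p.1 else none)).length = pvCount K cs := by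
  intro cs
  induction cs with
  | nil => intro st; simp [PySem.List.enumerate_nil, pvCount]
  | cons c cs ih =>
    intro st
    by_cases h : c ∈ K <;>
      simp [PySem.List.enumerate_cons, h, pvCount, List.filter_cons, ih]

theorem pvSetMid (pre : List Char) (x : Char) (sq : List Char) (u : Char) :
    (pre ++ x :: sq).set pre.length u = pre ++ u :: sq := by
  induction pre with
  | nil => simp
  | cons p pre ih => simp [ih]

theorem pvOffEq_refl (K : List Char) : ∀ cs : List Char, pvOffEq K cs cs := by
  intro cs
  induction cs with
  | nil => simp [pvOffEq]
  | cons c cs ih => exact ⟨fun _ => rfl, ih⟩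

theorem pvOffEq_fill (K : List Char) : ∀ (cs t : List Char), pvOffEq K cs (pvFill K cs t) := by
  intro cs
  induction cs with
  | nil => intro t; simp [pvOffEq, pvFill]
  | cons c cs ih =>
    intro t
    by_cases h : c ∈ K
    · cases t with
      | nil => simp only [pvFill, if_pos h]; exact ⟨fun hc => absurd h hc, ih []⟩
      | cons u t => rw [pvFill_cons_key _ _ _ _ _ h]; exact ⟨fun hc => absurd h hc, ih t⟩
    · rw [pvFill_cons_nonkey _ _ _ _ h]; exact ⟨fun _ => rfl, ih t⟩

theorem pvProdRep_len (K : List Char) : ∀ (n : Nat) (t : List Char),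
    t ∈ pvProdRep K n → t.length = n := by
  intro n
  induction n with
  | zero => intro t ht; simp [pvProdRep] at ht; simp [ht]
  | succ n ih =>
    intro t ht
    simp only [pvProdRep, List.mem_flatMap, List.mem_map] at ht
    obtain ⟨c, _, t', ht', rfl⟩ := ht
    simp [ih t' ht']

-- the in-place index-substitution pass equals the structural fill
theorem pvL1 (K : List Char) : ∀ (cs pre sq t : List Char),
    pvOffEq K cs sq → t.length = pvCount K cs →
    ((((PySem.List.enumerate cs (pre.length : Int)).filterMap
        (fun p => if p.2 ∈ K then some p.1 else none)).zip t).foldl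
      (fun a ic => PySem.List.pySetD a ic.1 ic.2) (pre ++ sq)) = pre ++ pvFill K cs t := by
  intro cs
  induction cs with
  | nil =>
    intro pre sq t hoff _
    simp [pvOffEq] at hoff
    subst hoff
    simp [PySem.List.enumerate_nil, pvFill]
  | cons c cs ih =>
    intro pre sq t hoff hlen
    cases sq with
    | nil => exact absurd hoff (by simp [pvOffEq])
    | cons x sq =>
      obtain ⟨hx, hoff'⟩ := hoff
      by_cases h : c ∈ K
      · have hc : pvCount K (c :: cs) = pvCount K cs + 1 := by
          simp [pvCount, List.filter_cons, h]
        cases t with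
        | nil => rw [hc] at hlen; simp at hlen
        | cons u t =>
          rw [hc] at hlen
          simp only [List.length_cons, Nat.add_right_cancel_iff] at hlen
          rw [PySem.List.enumerate_cons]
          simp only [List.filterMap_cons, if_pos h, List.zip_cons_cons, List.foldl_cons]
          rw [PySem.List.pySetD_natCast, pvSetMid]
          have h1 : pre ++ u :: sq = (pre ++ [u]) ++ sq := by simp
          have h2 : (pre.length : Int) + 1 = ((pre ++ [u]).length : Int) := by
            simp
          rw [h1, h2, ih (pre ++ [u]) sq t hoff' hlen]
          rw [pvFill_cons_key _ _ _ _ _ h]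
          simp
      · have hc : pvCount K (c :: cs) = pvCount K cs := by
          simp [pvCount, List.filter_cons, h]
        rw [hc] at hlen
        rw [PySem.List.enumerate_cons]
        simp only [List.filterMap_cons, if_neg h]
        have hx' : x = c := hx h
        subst hx'
        have h1 : pre ++ x :: sq = (pre ++ [x]) ++ sq := by simp
        have h2 : (pre.length : Int) + 1 = ((pre ++ [x]).length : Int) := by
          simp
        rw [h1, h2, ih (pre ++ [x]) sq t hoff' hlen]
        rw [pvFill_cons_nonkey _ _ _ _ h]
        simp

theorem pvStep_eq (K cs sq : List Char) (perms : List String) (t : List Char)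
    (hoff : pvOffEq K cs sq) (hlen : t.length = pvCount K cs) :
    pvStep K cs (sq, perms) t
      = (pvFill K cs t, perms ++ [String.mk (pvFill K cs t)]) := by
  have hset := pvL1 K cs [] sq t hoff hlen
  simp only [List.nil_append, List.length_nil, Nat.cast_zero] at hset
  simp only [pvStep]
  rw [hset]

theorem pvLoop (K cs : List Char) : ∀ (ts : List (List Char)) (sq : List Char) (perms : List String),
    pvOffEq K cs sq → (∀ t ∈ ts, t.length = pvCount K cs) →
    (ts.foldl (pvStep K cs) (sq, perms)).2
      = perms ++ ts.map (fun t => String.mk (pvFill K cs t)) := by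
  intro ts
  induction ts with
  | nil => intro sq perms _ _; simp
  | cons t ts ih =>
    intro sq perms hoff hlen
    rw [List.foldl_cons, pvStep_eq K cs sq perms t hoff (hlen t List.mem_cons_self),
      ih (pvFill K cs t) (perms ++ [String.mk (pvFill K cs t)]) (pvOffEq_fill K cs t)
        (fun u hu => hlen u (List.mem_cons_of_mem _ hu))]
    simp

-- A's enumeration equals the Cartesian product of per-position choice lists
theorem pvMain (K : List Char) : ∀ cs : List Char,
    (pvProdRep K (pvCount K cs)).map (pvFill K cs)
      = pvCartProd (cs.map (fun c => if c ∈ K then K else [c])) := by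
  intro cs
  induction cs with
  | nil => simp [pvCount, pvProdRep, pvCartProd, pvFill]
  | cons c cs ih =>
    by_cases h : c ∈ K
    · have hc : pvCount K (c :: cs) = pvCount K cs + 1 := by
        simp [pvCount, List.filter_cons, h]
      have step : ∀ k : Char,
          ((pvProdRep K (pvCount K cs)).map (k :: ·)).map (pvFill K (c :: cs))
            = ((pvCartProd (cs.map fun c => if c ∈ K then K else [c])).map (k :: ·)) := by
        intro k
        rw [List.map_map, ← ih, List.map_map]
        apply List.map_congr_left
        intro t _
        simp [Function.comp, pvFill_cons_key _ _ _ _ _ h]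
      rw [hc]
      simp only [List.map_cons, if_pos h, pvProdRep, pvCartProd, List.map_flatMap]
      simp only [step]
    · have hc : pvCount K (c :: cs) = pvCount K cs := by
        simp [pvCount, List.filter_cons, h]
      rw [hc]
      simp only [List.map_cons, if_neg h, pvCartProd, List.flatMap_cons, List.flatMap_nil,
        List.append_nil]
      rw [← ih, List.map_map]
      apply List.map_congr_left
      intro t _
      simp [pvFill_cons_nonkey _ _ _ _ h]

-- B's left-to-right fold equals flatMapping the Cartesian product onto the accumulator
theorem pvFoldB_cart (K : List Char) : ∀ (cs : List Char) (acc : List (List Char)),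
    cs.foldl (pvStepB K) acc
      = acc.flatMap (fun p =>
          (pvCartProd (cs.map (fun c => if c ∈ K then K else [c]))).map (p ++ ·)) := by
  intro cs
  induction cs with
  | nil => intro acc; simp [pvCartProd]
  | cons c cs ih =>
    intro acc
    rw [List.foldl_cons, ih (pvStepB K acc c)]
    by_cases h : c ∈ K
    · simp only [pvStepB, if_pos h, List.map_cons, pvCartProd, List.flatMap_assoc,
        List.flatMap_cons, List.map_flatMap, List.flatMap_map]
      apply List.flatMap_congr
      intro p _
      apply List.flatMap_congr
      intro k _
      simp [List.map_map, Function.comp_def]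
    · simp only [pvStepB, if_neg h, List.map_cons, pvCartProd, List.flatMap_cons,
        List.flatMap_nil, List.append_nil, List.flatMap_map, List.map_flatMap]
      apply List.flatMap_congr
      intro p _
      simp [List.map_map, Function.comp_def]

theorem pvPush_mk (l : List Char) (c : Char) : (String.mk l).push c = String.mk (l ++ [c]) := by
  show (String.ofList l).push c = String.ofList (l ++ [c])
  apply String.toList_injective
  simp

-- the String-level fold of B is the List Char-level fold, mapped through String.mk
theorem pvFoldB_str (K : List Char) : ∀ (cs : List Char) (accL : List (List Char)),
    cs.foldl
      (fun perms c =>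
        if c ∈ K then perms.flatMap (fun p => K.map (fun k => p.push k))
        else perms.map (fun p => p.push c))
      (accL.map String.mk)
      = (cs.foldl (pvStepB K) accL).map String.mk := by
  intro cs
  induction cs with
  | nil => intro accL; simp
  | cons c cs ih =>
    intro accL
    rw [List.foldl_cons, List.foldl_cons]
    have hstep : (if c ∈ K then (accL.map String.mk).flatMap (fun p => K.map (fun k => p.push k))
        else (accL.map String.mk).map (fun p => p.push c))
        = (pvStepB K accL c).map String.mk := by
      by_cases h : c ∈ K
      · simp [pvStepB, h, List.flatMap_map, List.map_flatMap, List.map_map, Function.comp_def,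
          pvPush_mk]
      · simp [pvStepB, h, List.map_map, Function.comp_def, pvPush_mk]
    rw [hstep, ih]

-- ===== VERDICT (by name: the statement is the Claim_ definition above) =====
theorem all_perms_of_s_spec : Claim_equal_all_perms_of_s := by
  intro s keyletters _
  unfold Spec_all_perms_of_s all_perms_of_s all_perms_of_s_alt
  simp only []
  rw [show (fun (st : List Char × List String) (t : List Char) =>
      let sq := (((PySem.List.enumerate s.toList).filterMap
          (fun p => if p.2 ∈ keyletters.toList then some p.1 else none)).zip t).foldl
        (fun a ic => PySem.List.pySetD a ic.1 ic.2) st.1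
      (sq, st.2 ++ [String.mk sq])) = pvStep keyletters.toList s.toList from rfl]
  rw [pvIdx_len keyletters.toList s.toList 0]
  rw [pvLoop keyletters.toList s.toList _ s.toList []
    (pvOffEq_refl keyletters.toList s.toList)
    (fun t ht => pvProdRep_len keyletters.toList _ t ht)]
  rw [List.nil_append]
  have hB : ([""] : List String) = ([[]] : List (List Char)).map String.mk := rfl
  rw [hB, pvFoldB_str keyletters.toList s.toList [[]],
    pvFoldB_cart keyletters.toList s.toList [[]]]
  simp only [List.flatMap_cons, List.flatMap_nil, List.append_nil, List.nil_append,
    List.map_id_fun', ← pvMain keyletters.toList s.toList, List.map_map]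
  rfl
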